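-- pv_equiv track=rewrite | github.com/emrahakyar/BDR-Solver | bdr_solver.py | gale_ryser_check
-- ===== SOURCE A (Python) =====
-- def gale_ryser_check(X, Y):
--     """
--     Phase 2: Formal verification using the Gale-Ryser majorization criteria.
--     Checks if X is majorized by the conjugate sequence Y*.
--     """
--     X = sorted(X, reverse=True)
--     Y = sorted(Y, reverse=True)
--
--     if sum(X) != sum(Y):
--         return False
--
--     # Compute conjugate sequence Y*
--     y_max = max(Y) if Y else 0
--     y_star = [0] * y_max
--     for val in Y:
--         for i in range(val):
--             y_star[i] += 1
--
--     # Majorization check: Prefix sums of X <= Prefix sums of Y*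
--     prefix_sum_x = 0
--     prefix_sum_ystar = 0
--
--     # Extend sequences for comparison
--     max_len = max(len(X), len(y_star))
--     x_ext = X + [0] * (max_len - len(X))
--     y_s_ext = y_star + [0] * (max_len - len(y_star))
--
--     for x_val, ys_val in zip(x_ext, y_s_ext):
--         prefix_sum_x += x_val
--         prefix_sum_ystar += ys_val
--         if prefix_sum_x > prefix_sum_ystar:
--             return False
--     return True
-- ===== SOURCE B (Python) =====
-- def gale_ryser_check(X, Y):
--     """
--     Gale-Ryser majorization check: X majorized by conjugate of Y.
--     Conjugate computed by counting + suffix sums (O(n + max(Y)))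
--     instead of A's nested range-increment loop (O(sum(Y))).
--     """
--     if sum(X) != sum(Y):
--         return False
--
--     # running maximum of the positive entries of Y
--     m = 0
--     for v in Y:
--         if v > m:
--             m = v
--
--     # counting array over values 1..m
--     cnt = [0] * (m + 1)
--     for v in Y:
--         if v > 0:
--             cnt[v] += 1
--
--     # conjugate built back-to-front via suffix sums: y_star[i] = #{y in Y : y > i}
--     y_star = []
--     running = 0
--     for i in range(m, 0, -1):
--         running += cnt[i]
--         y_star.append(running)
--     y_star.reverse()
--
--     xs = sorted(X, reverse=True)
--     px = ps = 0
--     for k in range(max(len(xs), len(y_star))):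
--         px += xs[k] if k < len(xs) else 0
--         ps += y_star[k] if k < len(y_star) else 0
--         if px > ps:
--             return False
--     return True
-- ===== Notes on version B (the rewrite author's own statement) =====
-- stated objective: faster
-- what changed: B computes the conjugate sequence of Y by a counting array plus one suffix-sum pass (and skips sorting Y, which only feeds max/counts) instead of A's nested loop that increments y_star[i] for every i below every value, turning O(sum(Y)) conjugate work into O(len(Y) + max(Y)).
import Mathlib
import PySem

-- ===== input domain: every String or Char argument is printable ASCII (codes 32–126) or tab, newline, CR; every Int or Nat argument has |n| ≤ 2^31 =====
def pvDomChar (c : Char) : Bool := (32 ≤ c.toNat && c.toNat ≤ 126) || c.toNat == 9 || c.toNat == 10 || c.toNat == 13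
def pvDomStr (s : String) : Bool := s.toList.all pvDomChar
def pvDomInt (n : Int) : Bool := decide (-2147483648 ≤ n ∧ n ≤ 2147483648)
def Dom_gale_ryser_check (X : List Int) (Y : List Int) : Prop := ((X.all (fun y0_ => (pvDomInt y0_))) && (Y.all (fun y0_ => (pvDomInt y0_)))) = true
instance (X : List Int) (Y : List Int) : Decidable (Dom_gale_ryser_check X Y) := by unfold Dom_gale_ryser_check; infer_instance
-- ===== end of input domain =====

-- B computes the conjugate of Y by counting values and taking suffix sums (O(n + max Y))
-- instead of A's nested range-increment loop (O(sum Y)); same return value everywhere.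

-- ===== PORT A =====
-- the final 'for x_val, ys_val in zip(...)' loop with its early 'return False'
def grcLoopA : List (Int × Int) → Int → Int → Bool
  | [], _, _ => true
  | p :: rest, px, ps =>
    let px' := px + p.1
    let ps' := ps + p.2
    if px' > ps' then false else grcLoopA rest px' ps'

def gale_ryser_check (X : List Int) (Y : List Int) : Bool :=
  let Xs := PySem.List.sorted X (fun x => x) true
  let Ys := PySem.List.sorted Y (fun x => x) true
  if Xs.sum ≠ Ys.sum then false
  else
    let y_max : Int := match PySem.List.max? Ys (fun x => x) with
      | some v => v
      | none => 0
    let y_star := Ys.foldl (fun ys val =>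
      (PySem.List.pyRange 0 val 1).foldl
        (fun ys i => PySem.List.pySetD ys i (PySem.List.pyGetD ys i 0 + 1)) ys)
      (List.replicate y_max.toNat (0:Int))
    let max_len := max Xs.length y_star.length
    let x_ext := Xs ++ List.replicate (max_len - Xs.length) (0:Int)
    let y_s_ext := y_star ++ List.replicate (max_len - y_star.length) (0:Int)
    grcLoopA (x_ext.zip y_s_ext) 0 0

-- ===== PORT B =====
-- the final 'for k in range(...)' loop with its early 'return False'
def grcLoopB (xs ystar : List Int) : List Int → Int → Int → Bool
  | [], _, _ => true
  | k :: rest, px, ps =>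
    let px' := px + (if k < (xs.length:Int) then PySem.List.pyGetD xs k 0 else 0)
    let ps' := ps + (if k < (ystar.length:Int) then PySem.List.pyGetD ystar k 0 else 0)
    if px' > ps' then false else grcLoopB xs ystar rest px' ps'

def gale_ryser_check_alt (X : List Int) (Y : List Int) : Bool :=
  if X.sum ≠ Y.sum then false
  else
    let m := Y.foldl (fun m v => if v > m then v else m) (0:Int)
    let cnt := Y.foldl
      (fun c v => if v > 0 then PySem.List.pySetD c v (PySem.List.pyGetD c v 0 + 1) else c)
      (List.replicate (m.toNat + 1) (0:Int))
    let y_star := ((PySem.List.pyRange m 0 (-1)).foldl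
      (fun s i => (s.1 ++ [s.2 + PySem.List.pyGetD cnt i 0], s.2 + PySem.List.pyGetD cnt i 0))
      ([], 0)).1.reverse
    let xs := PySem.List.sorted X (fun x => x) true
    grcLoopB xs y_star (PySem.List.pyRange 0 ((max xs.length y_star.length : Nat) : Int) 1) 0 0

-- ===== PRECONDITION & SPEC =====
def Spec_gale_ryser_check (X : List Int) (Y : List Int) (out : Bool) : Prop := out = gale_ryser_check_alt X Y
instance (X : List Int) (Y : List Int) (out : Bool) : Decidable (Spec_gale_ryser_check X Y out) := by unfold Spec_gale_ryser_check; infer_instance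

-- ===== CLAIM (what is proved, stated in full; the proofs are below) =====
def Claim_equal_gale_ryser_check : Prop := ∀ (X : List Int) (Y : List Int), Dom_gale_ryser_check X Y → Spec_gale_ryser_check X Y (gale_ryser_check X Y)

-- ===== LEMMAS AND PROOFS =====

theorem grc_map_range_getD (l : List Int) : (List.range l.length).map (fun j => l.getD j 0) = l := by
  apply List.ext_getElem
  · simp
  · intro i h1 h2
    simp [List.getD_eq_getElem?_getD, List.getElem?_eq_getElem h2]

theorem grc_getD_set (l : List Int) (i k : Nat) (x : Int) :
    (l.set i x).getD k 0 = if i = k ∧ i < l.length then x else l.getD k 0 := by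
  by_cases hk : k < l.length
  · rw [List.getD_eq_getElem _ _ (by simpa using hk), List.getElem_set]
    by_cases hik : i = k
    · subst hik; simp [hk]
    · simp only [hik, if_false, false_and, List.getD_eq_getElem _ _ hk]
  · rw [List.getD_eq_default _ _ (by simpa using Nat.le_of_not_lt hk),
        List.getD_eq_default _ _ (Nat.le_of_not_lt hk)]
    have : ¬ (i = k ∧ i < l.length) := by rintro ⟨rfl, h⟩; exact hk h
    simp [this]

theorem grc_inner_char (ys : List Int) (n : Nat) (hn : n ≤ ys.length) :
    (PySem.List.pyRange 0 (n:Int) 1).foldl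
      (fun ys i => PySem.List.pySetD ys i (PySem.List.pyGetD ys i 0 + 1)) ys
    = (List.range ys.length).map (fun j => ys.getD j 0 + if j < n then 1 else 0) := by
  induction n with
  | zero =>
    simp only [Nat.cast_zero, PySem.List.pyRange_zero, Int.toNat_zero, List.range_zero,
      List.map_nil, List.foldl_nil, Nat.not_lt_zero, if_false, add_zero]
    exact (grc_map_range_getD ys).symm
  | succ n ih =>
    have hn' : n ≤ ys.length := Nat.le_of_succ_le hn
    have hcast : ((n+1 : Nat) : Int) = (n : Int) + 1 := by push_cast; ring
    rw [hcast, PySem.List.pyRange_one_succ_right (by positivity), List.foldl_append]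
    rw [ih hn']
    simp only [List.foldl_cons, List.foldl_nil]
    rw [show ((n:Int)) = ((n:Nat):Int) from rfl, PySem.List.pyGetD_natCast, PySem.List.pySetD_natCast]
    rw [PySem.List.getD_map_range _ _ _ _ (by omega)]
    apply List.ext_getElem
    · simp
    · intro i h1 h2
      simp only [List.getElem_set, List.getElem_map, List.getElem_range]
      by_cases hin : n = i
      · subst hin; simp
      · simp only [hin, if_false]
        have h3 : i < ys.length := by simpa using h2
        by_cases hi : i < n
        · simp [hi, show i < n + 1 by omega]
        · simp [hi, show ¬ (i < n + 1) by omega]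

theorem grc_innerA (ys : List Int) (val : Int) (h : val ≤ (ys.length:Int)) :
    (PySem.List.pyRange 0 val 1).foldl
      (fun ys i => PySem.List.pySetD ys i (PySem.List.pyGetD ys i 0 + 1)) ys
    = (List.range ys.length).map (fun j => ys.getD j 0 + if (j:Int) < val then 1 else 0) := by
  by_cases h0 : 0 ≤ val
  · have hv : val = ((val.toNat : Nat) : Int) := by omega
    rw [hv, grc_inner_char ys val.toNat (by omega)]
    apply List.map_congr_left
    intro j hj
    congr 1
    by_cases hjv : j < val.toNat
    · rw [if_pos hjv, if_pos (by omega)]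
    · rw [if_neg hjv, if_neg (by omega)]
  · rw [PySem.List.pyRange_one_eq_nil (by omega), List.foldl_nil]
    have : ∀ j ∈ List.range ys.length, ys.getD j 0 + (if ((j:Nat):Int) < val then 1 else 0) = ys.getD j 0 := by
      intro j hj
      rw [if_neg (by omega), add_zero]
    rw [List.map_congr_left this, grc_map_range_getD]

theorem grc_foldA (Y : List Int) : ∀ ys : List Int, (∀ v ∈ Y, v ≤ (ys.length:Int)) →
    Y.foldl (fun ys val => (PySem.List.pyRange 0 val 1).foldl
      (fun ys i => PySem.List.pySetD ys i (PySem.List.pyGetD ys i 0 + 1)) ys) ys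
    = (List.range ys.length).map
        (fun j => ys.getD j 0 + (Y.countP (fun y => decide ((j:Int) < y)) : Int)) := by
  induction Y with
  | nil =>
    intro ys _
    simp only [List.foldl_nil, List.countP_nil, Nat.cast_zero, add_zero]
    exact (grc_map_range_getD ys).symm
  | cons v Y ih =>
    intro ys h
    rw [List.foldl_cons, grc_innerA ys v (h v List.mem_cons_self)]
    rw [ih _ (by intro w hw; simpa using h w (List.mem_cons_of_mem _ hw))]
    simp only [List.length_map, List.length_range]
    apply List.map_congr_left
    intro j hj
    have hjl : j < ys.length := List.mem_range.mp hj
    rw [PySem.List.getD_map_range _ _ _ _ hjl, List.countP_cons]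
    by_cases hv : (j:Int) < v
    · simp [hv]; ring
    · simp [hv]

theorem grc_ystarA (Y : List Int) (M : Nat) (h : ∀ v ∈ Y, v ≤ (M:Int)) :
    Y.foldl (fun ys val => (PySem.List.pyRange 0 val 1).foldl
      (fun ys i => PySem.List.pySetD ys i (PySem.List.pyGetD ys i 0 + 1)) ys)
      (List.replicate M (0:Int))
    = (List.range M).map (fun (j : Nat) => (Y.countP (fun y => decide ((j:Int) < y)) : Int)) := by
  rw [grc_foldA Y _ (by simpa using h)]
  simp only [List.length_replicate]
  apply List.map_congr_left
  intro j hj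
  rw [List.getD_replicate _ (List.mem_range.mp hj), zero_add]

theorem grc_cnt_getD (Y : List Int) : ∀ c : List Int, (∀ v ∈ Y, 0 < v → v < (c.length:Int)) →
    ∀ k : Nat, 0 < k →
    (Y.foldl (fun c v => if v > 0 then PySem.List.pySetD c v (PySem.List.pyGetD c v 0 + 1) else c) c).getD k 0
    = c.getD k 0 + (Y.count (k:Int) : Int) := by
  induction Y with
  | nil => intro c _ k _; simp
  | cons v Y ih =>
    intro c hc k hk
    rw [List.foldl_cons]
    have hcount : ((v :: Y).count (k:Int) : Int) = (Y.count (k:Int) : Int) + (if v = (k:Int) then 1 else 0) := by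
      rw [List.count_cons]
      by_cases hv : v = (k:Int) <;> simp [hv]
    by_cases hv : v > 0
    · have hvlen : v < (c.length:Int) := hc v List.mem_cons_self hv
      have hv0 : (0:Int) ≤ v := le_of_lt hv
      have hvnat : v = ((v.toNat : Nat) : Int) := by omega
      simp only [hv, if_true]
      rw [PySem.List.pySetD_of_nonneg _ _ hv0]
      rw [ih _ (by intro w hw h0; rw [List.length_set]; exact hc w (List.mem_cons_of_mem _ hw) h0) k hk]
      rw [grc_getD_set]
      by_cases hvk : v.toNat = k
      · rw [if_pos ⟨hvk, by omega⟩, hcount, if_pos (by omega)]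
        rw [hvnat, PySem.List.pyGetD_natCast, hvk]
        ring
      · rw [if_neg (by rintro ⟨h1, _⟩; exact hvk h1), hcount, if_neg (by omega)]
        ring
    · simp only [hv, if_false]
      rw [ih _ (by intro w hw h0; exact hc w (List.mem_cons_of_mem _ hw) h0) k hk]
      rw [hcount, if_neg (by omega)]
      ring

theorem grc_suffix (cnt : List Int) : ∀ (n : Nat) (acc : List Int) (r : Int),
    (PySem.List.pyRange (n:Int) 0 (-1)).foldl
       (fun s i => (s.1 ++ [s.2 + PySem.List.pyGetD cnt i 0], s.2 + PySem.List.pyGetD cnt i 0)) (acc, r)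
    = (acc ++ (PySem.List.pyRange (n:Int) 0 (-1)).map
         (fun i => r + ((PySem.List.pyRange i ((n:Int)+1) 1).map (fun t => PySem.List.pyGetD cnt t 0)).sum),
       r + ((PySem.List.pyRange 1 ((n:Int)+1) 1).map (fun t => PySem.List.pyGetD cnt t 0)).sum) := by
  intro n
  induction n with
  | zero =>
    intro acc r
    rw [PySem.List.pyRange_neg_one_eq_nil (by norm_num)]
    rw [show ((0:Nat):Int) + 1 = 1 by norm_num, PySem.List.pyRange_one_eq_nil (by norm_num)]
    simp
  | succ n ih =>
    intro acc r
    have hcast : ((n+1 : Nat) : Int) = (n : Int) + 1 := by push_cast; ring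
    rw [hcast, PySem.List.pyRange_neg_one_cons (by positivity), List.foldl_cons]
    have hsub : (n:Int) + 1 - 1 = (n:Int) := by ring
    rw [hsub]
    set c : Int := PySem.List.pyGetD cnt ((n:Int)+1) 0 with hc
    rw [ih (acc ++ [r + c]) (r + c)]
    have hS : ∀ i : Int, i ≤ (n:Int) + 1 →
        ((PySem.List.pyRange i ((n:Int)+1+1) 1).map (fun t => PySem.List.pyGetD cnt t 0)).sum
        = ((PySem.List.pyRange i ((n:Int)+1) 1).map (fun t => PySem.List.pyGetD cnt t 0)).sum + c := by
      intro i hi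
      rw [PySem.List.pyRange_one_succ_right hi, List.map_append, List.sum_append]
      simp [hc]
    refine Prod.ext ?_ ?_
    · dsimp only
      rw [List.map_cons, List.append_assoc, List.singleton_append]
      congr 1
      congr 1
      · rw [hS ((n:Int)+1) (by omega), PySem.List.pyRange_one_eq_nil (by omega)]
        simp
      · apply List.map_congr_left
        intro i hi
        have hmem := (PySem.List.mem_pyRange_neg_one).mp hi
        rw [hS i (by omega)]
        ring
    · dsimp only
      rw [hS 1 (by omega)]
      ring

theorem grc_countP_eq_sum (Y : List Int) (m : Int) (h : ∀ y ∈ Y, y ≤ m) (j : Nat) :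
    ((Y.countP (fun y => decide ((j:Int) < y)) : Int))
    = ((PySem.List.pyRange ((j:Int)+1) (m+1) 1).map (fun t => (Y.count t : Int))).sum := by
  induction Y with
  | nil => simp
  | cons y Y ih =>
    have hy : y ≤ m := h y List.mem_cons_self
    have ihY := ih (fun w hw => h w (List.mem_cons_of_mem _ hw))
    rw [List.countP_cons]
    have hcnt : ∀ t : Int, (((y :: Y).count t : Nat) : Int)
        = (Y.count t : Int) + (if y = t then 1 else 0) := by
      intro t
      rw [List.count_cons]
      by_cases hyt : y = t <;> simp [hyt]
    rw [List.map_congr_left (fun t _ => hcnt t)]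
    rw [PySem.List.sum_map_add_int]
    rw [← ihY]
    have hind : ((PySem.List.pyRange ((j:Int)+1) (m+1) 1).map (fun t => if y = t then (1:Int) else 0)).sum
        = if (j:Int) < y then 1 else 0 := by
      have : ∀ t : Int, (if y = t then (1:Int) else 0) = (if (fun t => decide (y = t)) t = true then (1:Int) else 0) := by
        intro t; by_cases hyt : y = t <;> simp [hyt]
      rw [List.map_congr_left (fun t _ => this t), PySem.List.sum_map_ite_one_zero]
      have hcp : (PySem.List.pyRange ((j:Int)+1) (m+1) 1).countP (fun t => decide (y = t))
          = (PySem.List.pyRange ((j:Int)+1) (m+1) 1).count y := by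
        rw [List.count]
        apply List.countP_congr
        intro t _
        constructor
        · intro ht; simp at ht; simp [ht]
        · intro ht; simp at ht; simp [ht]
      rw [hcp]
      by_cases hmem : y ∈ PySem.List.pyRange ((j:Int)+1) (m+1) 1
      · rw [List.count_eq_one_of_mem (PySem.List.nodup_pyRange_one _ _) hmem]
        have := (PySem.List.mem_pyRange_one).mp hmem
        rw [if_pos (by omega)]
        norm_num
      · rw [List.count_eq_zero_of_not_mem hmem]
        have : ¬ ((j:Int) < y) := by
          intro hlt
          exact hmem ((PySem.List.mem_pyRange_one).mpr ⟨by omega, by omega⟩)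
        rw [if_neg this]
        norm_num
    rw [hind]
    push_cast
    by_cases hjy : (j:Int) < y <;> simp [hjy]

theorem grc_fold_max (Y : List Int) : Y.foldl (fun m v => if v > m then v else m) 0 = Y.foldl max 0 := by
  apply PySem.List.foldl_congr_mem
  intro acc x _
  rcases le_or_gt x acc with hx | hx
  · rw [if_neg (not_lt.mpr hx), max_eq_left hx]
  · rw [if_pos hx, max_eq_right hx.le]

theorem grc_loopB_as_A (xs ys : List Int) : ∀ (ks : List Int) (px ps : Int),
    grcLoopB xs ys ks px ps
    = grcLoopA (ks.map (fun k =>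
        ((if k < (xs.length:Int) then PySem.List.pyGetD xs k 0 else 0),
         (if k < (ys.length:Int) then PySem.List.pyGetD ys k 0 else 0)))) px ps := by
  intro ks
  induction ks with
  | nil => intro px ps; rfl
  | cons k ks ih =>
    intro px ps
    simp only [grcLoopB, grcLoopA, List.map_cons]
    by_cases hgt : px + (if k < (xs.length:Int) then PySem.List.pyGetD xs k 0 else 0)
        > ps + (if k < (ys.length:Int) then PySem.List.pyGetD ys k 0 else 0)
    · simp [hgt]
    · simp [hgt, ih]

theorem grc_zip (xs ys : List Int) :
    (PySem.List.pyRange 0 ((max xs.length ys.length : Nat) : Int) 1).map (fun k =>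
        ((if k < (xs.length:Int) then PySem.List.pyGetD xs k 0 else 0),
         (if k < (ys.length:Int) then PySem.List.pyGetD ys k 0 else 0)))
    = (xs ++ List.replicate (max xs.length ys.length - xs.length) 0).zip
        (ys ++ List.replicate (max xs.length ys.length - ys.length) 0) := by
  apply List.ext_getElem
  · simp [PySem.List.length_pyRange_one]
    omega
  · intro k h1 h2
    have hk : k < max xs.length ys.length := by
      simpa [PySem.List.length_pyRange_one] using h1
    simp only [List.getElem_map, List.getElem_zip]
    rw [PySem.List.getElem_pyRange_one]
    have hget : ∀ (l : List Int), k < max xs.length ys.length →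
        (if ((k:Nat):Int) < (l.length:Int) then PySem.List.pyGetD l ((k:Nat):Int) 0 else 0)
        = (l ++ List.replicate (max xs.length ys.length - l.length) 0).getD k 0 := by
      intro l hkk
      by_cases hkl : k < l.length
      · rw [if_pos (by exact_mod_cast hkl), PySem.List.pyGetD_natCast]
        rw [List.getD_eq_getElem _ _ hkl,
            List.getD_eq_getElem _ _ (by simp only [List.length_append, List.length_replicate]; omega),
            List.getElem_append_left hkl]
      · rw [if_neg (by omega)]
        rw [List.getD_eq_getElem _ _ (by simp only [List.length_append, List.length_replicate]; omega)]
        rw [List.getElem_append_right (by omega)]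
        simp
    refine Prod.ext ?_ ?_
    · dsimp only
      simp only [zero_add]
      rw [hget xs hk, List.getD_eq_getElem _ _ (by simp only [List.length_append, List.length_replicate]; omega)]
    · dsimp only
      simp only [zero_add]
      rw [hget ys hk, List.getD_eq_getElem _ _ (by simp only [List.length_append, List.length_replicate]; omega)]

theorem grc_ystarB (Y cnt : List Int) (m : Int) (hm : 0 ≤ m)
    (hget : ∀ t : Int, 1 ≤ t → t ≤ m → PySem.List.pyGetD cnt t 0 = (Y.count t : Int))
    (hub : ∀ y ∈ Y, y ≤ m) :
    ((PySem.List.pyRange m 0 (-1)).foldl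
       (fun s i => (s.1 ++ [s.2 + PySem.List.pyGetD cnt i 0], s.2 + PySem.List.pyGetD cnt i 0)) ([], 0)).1.reverse
    = (List.range m.toNat).map (fun (j:Nat) => (Y.countP (fun y => decide ((j:Int) < y)) : Int)) := by
  obtain ⟨M, hMm⟩ : ∃ M : Nat, m = (M : Int) := ⟨m.toNat, by omega⟩
  subst hMm
  rw [grc_suffix]
  dsimp only
  rw [List.nil_append, PySem.List.pyRange_neg_one_eq_reverse, List.map_reverse, List.reverse_reverse]
  rw [show (0:Int) + 1 = 1 by ring, PySem.List.pyRange_one 1 ((M:Int)+1), List.map_map]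
  rw [show ((M:Int) + 1 - 1) = (M:Int) by ring, Int.toNat_natCast]
  apply List.map_congr_left
  intro j hj
  have hjM : j < M := List.mem_range.mp hj
  simp only [Function.comp]
  rw [zero_add]
  have hall : ∀ t ∈ PySem.List.pyRange (1 + (j:Int)) ((M:Int)+1) 1,
      PySem.List.pyGetD cnt t 0 = (Y.count t : Int) := by
    intro t ht
    have := (PySem.List.mem_pyRange_one).mp ht
    exact hget t (by omega) (by omega)
  rw [List.map_congr_left hall]
  rw [show (1:Int) + (j:Int) = (j:Int) + 1 by ring]
  rw [← grc_countP_eq_sum Y (M:Int) hub j]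

theorem grc_final (Xs C : List Int) :
    grcLoopA ((Xs ++ List.replicate (max Xs.length C.length - Xs.length) 0).zip
      (C ++ List.replicate (max Xs.length C.length - C.length) 0)) 0 0
    = grcLoopB Xs C (PySem.List.pyRange 0 ((max Xs.length C.length : Nat) : Int) 1) 0 0 := by
  rw [grc_loopB_as_A, grc_zip]

theorem grc_main (X Y : List Int) : gale_ryser_check X Y = gale_ryser_check_alt X Y := by
  simp only [gale_ryser_check, gale_ryser_check_alt]
  rw [(PySem.List.sorted_perm X (fun x => x) true).sum_eq,
      (PySem.List.sorted_perm Y (fun x => x) true).sum_eq]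
  by_cases hsum : X.sum = Y.sum
  · simp only [hsum, ne_eq, not_true_eq_false, if_false]
    rw [grc_fold_max]
    have hperm := PySem.List.sorted_perm Y (fun x => x) true
    obtain ⟨h0F, hubF⟩ := PySem.List.le_foldl_max Y 0
    have hmemF := PySem.List.foldl_max_mem Y 0
    -- B's count array reads back the multiplicities of Y
    have hcnt_get : ∀ t : Int, 1 ≤ t → t ≤ Y.foldl max 0 →
        PySem.List.pyGetD (Y.foldl
          (fun c v => if v > 0 then PySem.List.pySetD c v (PySem.List.pyGetD c v 0 + 1) else c)
          (List.replicate ((Y.foldl max 0).toNat + 1) (0:Int))) t 0 = (Y.count t : Int) := by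
      intro t h1 h2
      rw [show t = ((t.toNat : Nat) : Int) by omega, PySem.List.pyGetD_natCast]
      rw [grc_cnt_getD Y _ (by
            intro v hv hv0
            rw [List.length_replicate]
            have := hubF v hv
            omega) t.toNat (by omega)]
      rw [List.getD_replicate _ (by omega), zero_add, Int.toNat_of_nonneg (by omega)]
    have hB := grc_ystarB Y _ (Y.foldl max 0) h0F hcnt_get hubF
    set Ys := PySem.List.sorted Y (fun x => x) true with hYsdef
    set vA : Int := (match PySem.List.max? Ys (fun x => x) with | some v => v | none => 0) with hvA
    have hub2 : ∀ w ∈ Ys, w ≤ ((vA.toNat : Nat) : Int) := by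
      rcases hmax : PySem.List.max? Ys (fun x => x) with _ | v
      · intro w hw
        rw [(PySem.List.max?_eq_none_iff _ _).mp hmax] at hw
        simp at hw
      · intro w hw
        have h1 := PySem.List.max?_isMax hmax w hw
        have h2 : vA = v := by rw [hvA, hmax]
        omega
    have hMM : vA.toNat = (Y.foldl max 0).toNat := by
      rcases hmax : PySem.List.max? Ys (fun x => x) with _ | v
      · have hYs : Ys = [] := (PySem.List.max?_eq_none_iff _ _).mp hmax
        have hY : Y = [] := by
          have := hperm
          rw [hYs] at this
          exact this.symm.eq_nil
        have h2 : vA = 0 := by rw [hvA, hmax]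
        subst hY
        simp [h2]
      · have hvv : vA = v := by rw [hvA, hmax]
        have hvY : v ∈ Y := (PySem.List.mem_sorted Y (fun x => x) true v).mp
          (PySem.List.max?_mem hmax)
        have hub' : ∀ y ∈ Y, y ≤ v := by
          intro y hy
          exact PySem.List.max?_isMax hmax y ((PySem.List.mem_sorted Y (fun x => x) true y).mpr hy)
        have h1 : v ≤ Y.foldl max 0 := hubF v hvY
        have h2 : Y.foldl max 0 ≤ v ∨ Y.foldl max 0 = 0 := by
          rcases hmemF with h | h
          · right; exact h
          · left; exact hub' _ h
        rcases h2 with h | h <;> omega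
    rw [grc_ystarA Ys vA.toNat hub2]
    have hcountP : ∀ (j : Nat),
        (Ys.countP (fun y => decide ((j:Int) < y)))
        = (Y.countP (fun y => decide ((j:Int) < y))) := by
      intro j
      exact hperm.countP_eq _
    rw [List.map_congr_left (fun (j : Nat) _ => by rw [hcountP j])]
    rw [hMM, ← hB]
    exact grc_final _ _
  · simp [hsum]

-- ===== VERDICT (by name: the statement is the Claim_ definition above) =====
theorem gale_ryser_check_spec : Claim_equal_gale_ryser_check := by
  intro X Y _
  unfold Spec_gale_ryser_check
  exact grc_main X Y
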